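-- pv_equiv track=rewrite | github.com/trinity-cloud/drost | drost/storage/database.py | _normalize_fts_query
-- ===== SOURCE A (Python) =====
-- def _normalize_fts_query(query: str) -> str:
--     # Convert arbitrary user text into a literal-safe FTS5 query.
--     # Hyphenated terms like "third-party" must be split, otherwise FTS5
--     # can interpret them as query syntax and raise errors such as
--     # "no such column: party".
--     tokens: list[str] = []
--     current: list[str] = []
--     for ch in (query or ""):
--         if ch.isalnum() or ch == "_":
--             current.append(ch)
--             continue
--         if current:
--             tokens.append("".join(current))
--             current = []
--     if current:
--         tokens.append("".join(current))
--     if not tokens: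
--         return ""
--     return " AND ".join(f'"{token}"' for token in tokens[:12])
-- ===== SOURCE B (Python) =====
-- def _is_word(ch: str) -> bool:
--     return ch.isalnum() or ch == "_"
--
--
-- def _normalize_fts_query(query: str) -> str:
--     # Run-scanning two-pointer: slice whole word runs out of the string
--     # instead of accumulating a per-character buffer.
--     s = query or ""
--     n = len(s)
--     tokens: list[str] = []
--     i = 0
--     while i < n:
--         if _is_word(s[i]):
--             j = i + 1
--             while j < n and _is_word(s[j]):
--                 j += 1
--             tokens.append(s[i:j])
--             i = j
--         else:
--             i += 1
--     if not tokens: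
--         return ""
--     return " AND ".join('"{}"'.format(t) for t in tokens[:12])
-- ===== Notes on version B (the rewrite author's own statement) =====
-- stated objective: alternative
-- what changed: Replaces the per-character buffer/flush state machine with a two-pointer run scanner that slices each maximal word run out of the string in one step.
import Mathlib
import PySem

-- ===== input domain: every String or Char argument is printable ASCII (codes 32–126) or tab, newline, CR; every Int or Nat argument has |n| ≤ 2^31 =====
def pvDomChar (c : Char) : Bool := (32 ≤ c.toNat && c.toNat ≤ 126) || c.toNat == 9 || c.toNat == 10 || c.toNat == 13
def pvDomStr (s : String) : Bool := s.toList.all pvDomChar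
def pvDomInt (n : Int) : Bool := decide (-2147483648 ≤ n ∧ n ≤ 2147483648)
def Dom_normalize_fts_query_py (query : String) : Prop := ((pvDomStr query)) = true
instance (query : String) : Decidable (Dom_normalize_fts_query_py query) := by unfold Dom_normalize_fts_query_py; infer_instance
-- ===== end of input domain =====

-- ===== PORT A =====
-- B changes: two-pointer run scanner instead of A's per-character buffer state machine (objective: alternative).
-- Port of A: fold over the characters carrying (tokens, current buffer), final flush, then join.
def pvAStep (st : List String × List Char) (ch : Char) : List String × List Char :=
  if ch.isAlphanum || ch == '_' then (st.1, st.2 ++ [ch])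
  else if st.2 = [] then st
  else (st.1 ++ [String.ofList st.2], [])

def pvAFlush (st : List String × List Char) : List String :=
  if st.2 = [] then st.1 else st.1 ++ [String.ofList st.2]

-- Shared tail (identical lines in both Pythons): join the first 12 tokens quoted with " AND ".
def pvJoin (tokens : List String) : String :=
  if tokens = [] then ""
  else String.intercalate " AND " ((tokens.take 12).map (fun t => "\"" ++ t ++ "\""))

def normalize_fts_query_py (query : String) : String :=
  pvJoin (pvAFlush (query.toList.foldl pvAStep ([], [])))

-- ===== PORT B =====
def pvIsWord (ch : Char) : Bool := ch.isAlphanum || ch == '_'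

-- Port of B's run scanner: skip a non-word char, or take the whole maximal word run at once.
def pvBTok : List Char → List String
  | [] => []
  | c :: rest =>
    if pvIsWord c then
      String.ofList (c :: rest.takeWhile pvIsWord) :: pvBTok (rest.dropWhile pvIsWord)
    else pvBTok rest
termination_by cs => cs.length
decreasing_by
  · exact Nat.lt_succ_of_le (rest.length_dropWhile_le pvIsWord)
  · exact Nat.lt_succ_self _

def normalize_fts_query_py_alt (query : String) : String :=
  pvJoin (pvBTok query.toList)

-- ===== PRECONDITION & SPEC =====
def Spec_normalize_fts_query_py (query : String) (out : String) : Prop := out = normalize_fts_query_py_alt query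
instance (query : String) (out : String) : Decidable (Spec_normalize_fts_query_py query out) := by unfold Spec_normalize_fts_query_py; infer_instance

-- ===== CLAIM (what is proved, stated in full; the proofs are below) =====
def Claim_equal_normalize_fts_query_py : Prop := ∀ (query : String), Dom_normalize_fts_query_py query → Spec_normalize_fts_query_py query (normalize_fts_query_py query)

-- ===== LEMMAS AND PROOFS =====

-- A's fold followed by the final flush computes exactly B's run tokens, from any starting state.
lemma pvMain (cs : List Char) : ∀ (toks : List String) (cur : List Char),
    pvAFlush (cs.foldl pvAStep (toks, cur))
    = toks ++ (if cur = [] then pvBTok cs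
               else String.ofList (cur ++ cs.takeWhile pvIsWord) :: pvBTok (cs.dropWhile pvIsWord)) := by
  induction cs with
  | nil =>
    intro toks cur
    by_cases h : cur = [] <;> simp [h, pvAFlush, pvBTok]
  | cons c rest ih =>
    intro toks cur
    by_cases hw : pvIsWord c
    · have hw' : (c.isAlphanum || c == '_') = true := hw
      by_cases h : cur = []
      · subst h
        simp only [List.foldl, pvAStep, hw', if_true, List.nil_append]
        rw [ih toks [c]]
        simp [pvBTok, hw]
      · simp only [List.foldl, pvAStep, hw', if_true]
        rw [ih toks (cur ++ [c])]
        simp [h, List.takeWhile, hw, List.dropWhile]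
    · have hw' : (c.isAlphanum || c == '_') = false := by
        simpa [pvIsWord] using hw
      by_cases h : cur = []
      · subst h
        simp only [List.foldl, pvAStep, hw', Bool.false_eq_true, if_false, if_true]
        rw [ih toks []]
        simp [pvBTok, hw]
      · simp only [List.foldl, pvAStep, hw', Bool.false_eq_true, if_false, if_neg h]
        rw [ih (toks ++ [String.ofList cur]) []]
        simp [List.takeWhile, hw, List.dropWhile, pvBTok]

lemma pvTokens_eq (cs : List Char) :
    pvAFlush (cs.foldl pvAStep ([], [])) = pvBTok cs := by
  simpa using pvMain cs [] []

-- ===== VERDICT (by name: the statement is the Claim_ definition above) =====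
theorem normalize_fts_query_py_spec : Claim_equal_normalize_fts_query_py := by
  intro query _
  unfold Spec_normalize_fts_query_py normalize_fts_query_py normalize_fts_query_py_alt
  rw [pvTokens_eq]
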